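-- pv_equiv track=rewrite | github.com/Fadil08/algo2-sem2 | pertemuan 13/ref.py | min2d
-- ===== SOURCE A (Python) =====
-- def min2d (list2d,extractIndex):
--     lengthSet = []
--     for index in list2d:
--         lengthSet.append( (index[extractIndex]) )
--     minimum = min(lengthSet)
--     for i in list2d:
--         if i[extractIndex] == minimum:
--             return i
-- ===== SOURCE B (Python) =====
-- def min2d(list2d, extractIndex):
--     # single pass tracking the first minimal row (strict < keeps the earliest on ties)
--     if not list2d:
--         raise ValueError("min2d() arg is an empty sequence")
--     best = list2d[0]
--     bestv = best[extractIndex]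
--     for row in list2d[1:]:
--         v = row[extractIndex]
--         if v < bestv:
--             best, bestv = row, v
--     return best
-- ===== Notes on version B (the rewrite author's own statement) =====
-- stated objective: simpler
-- what changed: Replaces A's two-phase build-a-value-list / min / rescan-for-first-match with one explicit pass that tracks the best row and its value (strict < keeps the first minimal row).
import Mathlib
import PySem

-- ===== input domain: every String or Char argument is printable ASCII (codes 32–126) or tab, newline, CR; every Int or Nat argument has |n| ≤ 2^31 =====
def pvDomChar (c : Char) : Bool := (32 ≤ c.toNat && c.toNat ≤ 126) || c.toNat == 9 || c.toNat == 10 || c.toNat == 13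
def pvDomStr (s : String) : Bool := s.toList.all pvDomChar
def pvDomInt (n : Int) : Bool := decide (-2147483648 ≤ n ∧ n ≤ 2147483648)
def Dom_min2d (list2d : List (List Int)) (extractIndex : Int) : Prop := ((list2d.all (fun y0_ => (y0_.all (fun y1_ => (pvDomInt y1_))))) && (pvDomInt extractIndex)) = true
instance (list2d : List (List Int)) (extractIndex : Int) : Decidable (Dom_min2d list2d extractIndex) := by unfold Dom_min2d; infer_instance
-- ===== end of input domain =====

-- B replaces A's two-phase build-values-list / min / rescan with one explicit pass tracking the best row (simpler, same O(n)).


-- ===== PORT A =====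
-- A's second loop: return the first row whose extracted value equals `m` ([] unreachable under Pre_).
def min2dFind (extractIndex : Int) (m : Int) : List (List Int) → List Int
  | [] => []
  | i :: rest => if (PySem.List.pyGet? i extractIndex).getD 0 == m then i else min2dFind extractIndex m rest

def min2d (list2d : List (List Int)) (extractIndex : Int) : List Int :=
  let lengthSet := list2d.foldl (fun acc index => acc ++ [(PySem.List.pyGet? index extractIndex).getD 0]) []
  match PySem.List.min? lengthSet (fun x => x) with
  | none => []          -- Python: min([]) raises ValueError; excluded by Pre_
  | some minimum => min2dFind extractIndex minimum list2d

-- ===== PORT B =====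
-- B's loop: carry the best row and its value; strict < keeps the first minimal row.
def min2dLoop (extractIndex : Int) : List (List Int) → List Int → Int → List Int
  | [], best, _ => best
  | row :: rest, best, bestv =>
      if (PySem.List.pyGet? row extractIndex).getD 0 < bestv then
        min2dLoop extractIndex rest row ((PySem.List.pyGet? row extractIndex).getD 0)
      else min2dLoop extractIndex rest best bestv

def min2d_alt (list2d : List (List Int)) (extractIndex : Int) : List Int :=
  match list2d with
  | [] => []            -- Python B raises ValueError here; excluded by Pre_
  | r :: rest => min2dLoop extractIndex rest r ((PySem.List.pyGet? r extractIndex).getD 0)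

-- ===== PRECONDITION & SPEC =====
-- Pre_ excludes exactly the inputs where Python A raises: the empty list (ValueError from min)
-- and any row for which row[extractIndex] is an IndexError.
def Pre_min2d (list2d : List (List Int)) (extractIndex : Int) : Prop :=
  list2d ≠ [] ∧ ∀ row ∈ list2d, (PySem.List.pyGet? row extractIndex).isSome
instance (list2d : List (List Int)) (extractIndex : Int) : Decidable (Pre_min2d list2d extractIndex) := by unfold Pre_min2d; infer_instance
def pvWitness_min2d : List (List Int) × Int := ([[3, 1], [2, 5], [2, 0]], 0)

def Spec_min2d (list2d : List (List Int)) (extractIndex : Int) (out : List Int) : Prop := out = min2d_alt list2d extractIndex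
instance (list2d : List (List Int)) (extractIndex : Int) (out : List Int) : Decidable (Spec_min2d list2d extractIndex out) := by unfold Spec_min2d; infer_instance

-- ===== CLAIM (what is proved, stated in full; the proofs are below) =====
def Claim_equal_min2d : Prop := ∀ (list2d : List (List Int)) (extractIndex : Int), Dom_min2d list2d extractIndex → Pre_min2d list2d extractIndex → Spec_min2d list2d extractIndex (min2d list2d extractIndex)

-- ===== LEMMAS AND PROOFS =====

-- the extracted value of a row (defeq to the expression both ports use)
def fval (extractIndex : Int) (row : List Int) : Int := (PySem.List.pyGet? row extractIndex).getD 0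

-- minimum of the extracted values over r :: l
def mval (extractIndex : Int) (r : List Int) : List (List Int) → Int
  | [] => fval extractIndex r
  | x :: xs => min (fval extractIndex r) (mval extractIndex x xs)

-- the first minimal row of r :: l (reference spec)
def fms (extractIndex : Int) (r : List Int) : List (List Int) → List Int
  | [] => r
  | x :: xs => if fval extractIndex r ≤ fval extractIndex (fms extractIndex x xs) then r
               else fms extractIndex x xs

lemma fms_val (e : Int) (r : List Int) (l : List (List Int)) :
    fval e (fms e r l) = mval e r l := by
  induction l generalizing r with
  | nil => rfl
  | cons x xs ih =>
      simp only [fms, mval]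
      split_ifs with h <;> rw [ih x] at * <;> omega

lemma mval_le (e : Int) (x : List Int) (xs : List (List Int)) :
    mval e x xs ≤ fval e x := by
  cases xs <;> simp [mval]

lemma foldl_lengthSet (e : Int) (l : List (List Int)) (acc : List Int) :
    (l.foldl (fun acc index => acc ++ [(PySem.List.pyGet? index e).getD 0]) acc) =
      acc ++ l.map (fval e) := by
  induction l generalizing acc with
  | nil => simp
  | cons x xs ih => simp [ih, fval]

lemma min?_map (e : Int) (r : List Int) (l : List (List Int)) :
    PySem.List.min? ((r :: l).map (fval e)) (fun x => x) = some (mval e r l) := by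
  rw [List.map_cons, PySem.List.min?_id_cons]
  congr 1
  induction l generalizing r with
  | nil => rfl
  | cons x xs ih =>
      simp only [List.map_cons, List.foldl_cons, mval]
      rw [← ih x]
      have : ∀ (s : List Int) (a b : Int), s.foldl min (min a b) = min a (s.foldl min b) := by
        intro s
        induction s with
        | nil => intro a b; rfl
        | cons y ys ihy =>
            intro a b
            simp only [List.foldl_cons]
            rw [← ihy, min_assoc]
      exact this _ _ _

lemma find_step (e m : Int) (r : List Int) (l : List (List Int)) :
    min2dFind e m (r :: l) = if fval e r == m then r else min2dFind e m l := rfl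

lemma loop_step (e bv : Int) (best row : List Int) (l : List (List Int)) :
    min2dLoop e (row :: l) best bv =
      if fval e row < bv then min2dLoop e l row (fval e row) else min2dLoop e l best bv := rfl

lemma find_eq_fms (e : Int) (r : List Int) (l : List (List Int)) :
    min2dFind e (mval e r l) (r :: l) = fms e r l := by
  induction l generalizing r with
  | nil => rw [find_step]; simp [mval, fms]
  | cons x xs ih =>
      rw [find_step]
      simp only [mval, fms]
      by_cases h : fval e r ≤ mval e x xs
      · have hmin : min (fval e r) (mval e x xs) = fval e r := by omega
        rw [hmin, if_pos (by simp), if_pos (by rw [fms_val]; exact h)]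
      · have hmin : min (fval e r) (mval e x xs) = mval e x xs := by omega
        rw [hmin, if_neg (by simp only [beq_iff_eq]; omega), ih x,
          if_neg (by rw [fms_val]; omega)]

lemma loop_eq_fms (e : Int) (r : List Int) (l : List (List Int)) :
    min2dLoop e l r (fval e r) = fms e r l := by
  induction l generalizing r with
  | nil => rfl
  | cons x xs ih =>
      rw [loop_step]
      simp only [fms]
      by_cases h : fval e x < fval e r
      · rw [if_pos h, ih x,
          if_neg (by rw [fms_val]; have := mval_le e x xs; omega)]
      · rw [if_neg h, ih r]
        cases xs with
        | nil => simp only [fms]; rw [if_pos (by omega)]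
        | cons y ys =>
            simp only [fms]
            split_ifs <;> first | rfl | omega

-- ===== VERDICT (by name: the statement is the Claim_ definition above) =====
theorem min2d_spec : Claim_equal_min2d := by
  intro list2d e _ hpre
  obtain ⟨hne, -⟩ := hpre
  obtain ⟨r, rest, rfl⟩ := List.exists_cons_of_ne_nil hne
  have hA : min2d (r :: rest) e =
      match PySem.List.min? ((r :: rest).foldl
          (fun acc index => acc ++ [(PySem.List.pyGet? index e).getD 0]) []) (fun x => x) with
        | none => []
        | some m => min2dFind e m (r :: rest) := rfl
  rw [foldl_lengthSet, List.nil_append, min?_map] at hA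
  show min2d (r :: rest) e = min2d_alt (r :: rest) e
  rw [hA]
  exact (find_eq_fms e r rest).trans (loop_eq_fms e r rest).symm
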